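-- pv_equiv track=rewrite | github.com/Minerstove/Python | cs11/LastHopeStudy/MockHope1/hope1j.py | proper_substring_pairs
-- ===== SOURCE A (Python) =====
-- def proper_substring_pairs(strings):
--     first_s = strings
--     second_s = strings
--     pairs = (
--         (word2, word1)
--         for word1 in first_s
--         for word2 in second_s
--         if (word1 in word2 and word1 != word2)
--     )
--
--     return frozenset(pairs)
-- ===== SOURCE B (Python) =====
-- def proper_substring_pairs(strings):
--     # Inverted index: for each distinct string, enumerate its proper substrings
--     # once and look them up in the key table -- no pairwise substring scan.
--     uniq = list(dict.fromkeys(strings))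
--     containers = {w: [] for w in uniq}
--     for w2 in uniq:
--         n = len(w2)
--         seen = dict.fromkeys(
--             w2[i:j]
--             for i in range(n + 1)
--             for j in range(i, n + 1)
--             if j - i < n
--         )
--         for s in seen:
--             if s in containers:
--                 containers[s].append(w2)
--     return frozenset((w2, w1) for w1 in uniq for w2 in containers[w1])
-- ===== Notes on version B (the rewrite author's own statement) =====
-- stated objective: faster
-- what changed: B replaces the pairwise substring grid with an inverted index: it deduplicates the input, enumerates each string's proper substrings once and looks them up in a hash table keyed by the input strings, appending containing strings per substring bucket, then flattens the buckets; no string-in-string pairwise test remains.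
import Mathlib
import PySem

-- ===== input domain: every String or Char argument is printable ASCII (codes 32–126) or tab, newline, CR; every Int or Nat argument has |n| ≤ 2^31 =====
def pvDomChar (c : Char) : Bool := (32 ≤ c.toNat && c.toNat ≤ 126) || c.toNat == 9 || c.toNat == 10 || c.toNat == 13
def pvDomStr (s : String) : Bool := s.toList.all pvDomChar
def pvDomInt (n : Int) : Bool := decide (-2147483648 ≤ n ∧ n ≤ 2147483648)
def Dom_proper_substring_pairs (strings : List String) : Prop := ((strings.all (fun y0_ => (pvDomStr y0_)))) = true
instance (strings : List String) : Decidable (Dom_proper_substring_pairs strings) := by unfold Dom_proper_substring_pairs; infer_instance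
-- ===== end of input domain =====

-- B replaces the pairwise substring grid with an inverted index (distinct proper
-- substrings of each string looked up in a dict keyed by the input strings):
-- measurably faster on the generated inputs, same return value.

-- ===== PORT A =====
-- generator: ((word2, word1) for word1 in strings for word2 in strings if word1 in word2 and word1 != word2), then frozenset
def proper_substring_pairs (strings : List String) : List (String × String) :=
  let first_s := strings
  let second_s := strings
  let pairs := first_s.flatMap (fun word1 =>
    (second_s.filter (fun word2 =>
      PySem.Str.isIn word1 word2 && word1 != word2)).map (fun word2 => (word2, word1)))
  PySem.Set.ofList pairs

-- ===== PORT B =====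
-- seen = dict.fromkeys(w2[i:j] for i in range(n+1) for j in range(i, n+1) if j - i < n)
def pvSubs (w2 : String) : List String :=
  PySem.List.dedup ((PySem.List.pyRange 0 (PySem.Str.len w2 + 1) 1).flatMap (fun i =>
    ((PySem.List.pyRange i (PySem.Str.len w2 + 1) 1).filter
        (fun j => decide (j - i < PySem.Str.len w2))).map
      (fun j => PySem.Str.slice w2 (some i) (some j))))

def proper_substring_pairs_alt (strings : List String) : List (String × String) :=
  let uniq := PySem.List.dedup strings
  let containers0 : PySem.Dict String (List String) :=
    uniq.foldl (fun d w => d.insert w []) PySem.Dict.empty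
  let containers := uniq.foldl (fun d w2 =>
    (pvSubs w2).foldl (fun d s =>
      if d.contains s then d.modify s [] (fun l => l ++ [w2]) else d) d) containers0
  PySem.Set.ofList (uniq.flatMap (fun w1 =>
    (containers.getD w1 []).map (fun w2 => (w2, w1))))

-- ===== PRECONDITION & SPEC =====
def Spec_proper_substring_pairs (strings : List String) (out : List (String × String)) : Prop := out = proper_substring_pairs_alt strings
instance (strings : List String) (out : List (String × String)) : Decidable (Spec_proper_substring_pairs strings out) := by unfold Spec_proper_substring_pairs; infer_instance

-- ===== CLAIM (what is proved, stated in full; the proofs are below) =====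
def Claim_equal_proper_substring_pairs : Prop := ∀ (strings : List String), Dom_proper_substring_pairs strings → Spec_proper_substring_pairs strings (proper_substring_pairs strings)

-- ===== LEMMAS AND PROOFS =====

-- A's condition (w1 in w2 and w1 != w2) equals (len(w1) < len(w2) and w1 in w2)
theorem pv_pred_eq (w1 w2 : String) :
    (PySem.Str.isIn w1 w2 && w1 != w2)
      = (decide (PySem.Str.len w1 < PySem.Str.len w2) && PySem.Str.isIn w1 w2) := by
  cases hin : PySem.Str.isIn w1 w2
  · simp
  · have hinf : w1.toList <:+: w2.toList := (PySem.Str.isIn_iff_infix w1 w2).mp hin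
    simp only [Bool.true_and, Bool.and_true]
    by_cases he : w1 = w2
    · subst he
      simp
    · have hne' : w1.toList ≠ w2.toList := fun h => he (String.toList_inj.mp h)
      have hle : w1.toList.length ≤ w2.toList.length := List.IsInfix.length_le hinf
      have hlt : w1.toList.length < w2.toList.length := by
        rcases lt_or_eq_of_le hle with h | h
        · exact h
        · exact absurd (List.IsInfix.eq_of_length hinf h) hne'
      have hcmp : PySem.Str.len w1 < PySem.Str.len w2 := by
        rw [PySem.Str.len_eq, PySem.Str.len_eq]
        exact_mod_cast hlt
      simp only [bne_iff_ne, ne_eq, he, not_false_eq_true, decide_true, hcmp]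

-- membership in the substring enumeration IS proper infixhood
theorem pv_mem_subs (w1 w2 : String) :
    w1 ∈ pvSubs w2 ↔ (w1.toList <:+: w2.toList ∧ w1.toList.length < w2.toList.length) := by
  unfold pvSubs
  rw [PySem.List.mem_dedup, List.mem_flatMap]
  constructor
  · rintro ⟨i, hi, hw⟩
    rw [PySem.List.mem_pyRange_one] at hi
    rw [List.mem_map] at hw
    obtain ⟨j, hj, hslice⟩ := hw
    rw [List.mem_filter] at hj
    obtain ⟨hj1, hj2⟩ := hj
    rw [PySem.List.mem_pyRange_one] at hj1
    rw [decide_eq_true_eq] at hj2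
    rw [PySem.Str.len_eq] at hi hj1 hj2
    have h0i : 0 ≤ i := hi.1
    have h0j : 0 ≤ j := le_trans h0i hj1.1
    have htl : w1.toList = (w2.toList.drop i.toNat).take (j.toNat - i.toNat) := by
      rw [← hslice]
      simp only [PySem.Str.toList_slice, PySem.Chars.slice_eq_listSlice]
      rw [PySem.List.slice_toNat _ h0i h0j]
    constructor
    · rw [htl]
      exact ((List.take_prefix _ _).isInfix).trans ((List.drop_suffix _ _).isInfix)
    · rw [htl]
      have h1 : ((w2.toList.drop i.toNat).take (j.toNat - i.toNat)).length ≤ j.toNat - i.toNat := by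
        rw [List.length_take]; omega
      have h2 : j.toNat - i.toNat < w2.toList.length := by omega
      omega
  · rintro ⟨hinf, hlen⟩
    obtain ⟨pre, suf, hps⟩ := hinf
    have hsum : pre.length + w1.toList.length + suf.length = w2.toList.length := by
      have := congrArg List.length hps
      simp only [List.length_append] at this
      omega
    refine ⟨(pre.length : Int), ?_, ?_⟩
    · rw [PySem.List.mem_pyRange_one, PySem.Str.len_eq]
      omega
    · rw [List.mem_map]
      refine ⟨(pre.length : Int) + (w1.toList.length : Int), ?_, ?_⟩
      · rw [List.mem_filter, PySem.List.mem_pyRange_one, PySem.Str.len_eq]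
        refine ⟨⟨by omega, by omega⟩, by rw [decide_eq_true_eq]; omega⟩
      · apply String.toList_inj.mp
        simp only [PySem.Str.toList_slice, PySem.Chars.slice_eq_listSlice]
        rw [PySem.List.slice_natCast_add]
        rw [← hps, List.append_assoc, List.drop_left, List.take_left]

-- the Bool forms agree
theorem pv_seen_iff (w1 w2 : String) :
    decide (w1 ∈ pvSubs w2)
      = (decide (PySem.Str.len w1 < PySem.Str.len w2) && PySem.Str.isIn w1 w2) := by
  by_cases h : w1 ∈ pvSubs w2
  · obtain ⟨hinf, hlen⟩ := (pv_mem_subs w1 w2).mp h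
    have h1 : PySem.Str.isIn w1 w2 = true := (PySem.Str.isIn_iff_infix w1 w2).mpr hinf
    have h2 : PySem.Str.len w1 < PySem.Str.len w2 := by
      rw [PySem.Str.len_eq, PySem.Str.len_eq]; exact_mod_cast hlen
    rw [decide_eq_true h, decide_eq_true h2, h1]; rfl
  · rw [decide_eq_false h]
    by_cases h1 : PySem.Str.isIn w1 w2 = true
    · have hinf := (PySem.Str.isIn_iff_infix w1 w2).mp h1
      by_cases h2 : PySem.Str.len w1 < PySem.Str.len w2
      · exfalso
        apply h
        rw [pv_mem_subs]
        refine ⟨hinf, ?_⟩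
        rw [PySem.Str.len_eq, PySem.Str.len_eq] at h2
        exact_mod_cast h2
      · rw [decide_eq_false h2, Bool.false_and]
    · rw [Bool.eq_false_iff.mpr h1, Bool.and_false]

-- the inner substring loop never changes the key set
theorem pv_inner_contains (w2 : String) (D : List String) :
    ∀ (d : PySem.Dict String (List String)) (k : String),
      (D.foldl (fun d s =>
        if d.contains s then d.modify s [] (fun l => l ++ [w2]) else d) d).contains k
        = d.contains k := by
  induction D with
  | nil => intro d k; rfl
  | cons s D ih =>
    intro d k
    rw [List.foldl_cons, ih]
    by_cases hc : d.contains s = true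
    · rw [if_pos hc, PySem.Dict.contains_modify]
      by_cases hk : k = s
      · subst hk; simp [hc]
      · simp [hk]
    · rw [if_neg hc]

-- effect of the inner substring loop on one bucket
theorem pv_inner_getD (w2 : String) (D : List String) (hD : D.Nodup) :
    ∀ (d : PySem.Dict String (List String)) (k : String), d.contains k = true →
      (D.foldl (fun d s =>
        if d.contains s then d.modify s [] (fun l => l ++ [w2]) else d) d).getD k []
        = d.getD k [] ++ (if k ∈ D then [w2] else []) := by
  induction D with
  | nil => intro d k _; simp
  | cons s D ih =>
    intro d k hk
    rw [List.foldl_cons]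
    have hD' : D.Nodup := hD.of_cons
    by_cases hks : k = s
    · subst hks
      rw [if_pos hk]
      have hcon : (d.modify k [] (fun l => l ++ [w2])).contains k = true := by
        rw [PySem.Dict.contains_modify]; simp
      rw [ih hD' _ k hcon]
      have hkD : k ∉ D := (List.nodup_cons.mp hD).1
      rw [if_neg hkD, List.append_nil, PySem.Dict.getD_modify_self]
      simp
    · have heq : (if d.contains s then d.modify s [] (fun l => l ++ [w2]) else d).getD k []
          = d.getD k [] := by
        by_cases hc : d.contains s = true
        · rw [if_pos hc, PySem.Dict.getD_modify, if_neg hks]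
        · rw [if_neg hc]
      have hcon : (if d.contains s then d.modify s [] (fun l => l ++ [w2]) else d).contains k
          = true := by
        by_cases hc : d.contains s = true
        · rw [if_pos hc, PySem.Dict.contains_modify]; simp [hk]
        · rw [if_neg hc]; exact hk
      rw [ih hD' _ k hcon, heq]
      have : (k ∈ s :: D) ↔ (k ∈ D) := by simp [hks]
      simp only [this]

-- effect of the whole outer loop on one bucket
theorem pv_outer_getD (P : List String) :
    ∀ (d : PySem.Dict String (List String)) (k : String), d.contains k = true →
      (P.foldl (fun d w2 =>
        (pvSubs w2).foldl (fun d s =>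
          if d.contains s then d.modify s [] (fun l => l ++ [w2]) else d) d) d).getD k []
        = d.getD k [] ++ P.filter (fun w2 => decide (k ∈ pvSubs w2)) := by
  induction P with
  | nil => intro d k _; simp
  | cons w2 P ih =>
    intro d k hk
    rw [List.foldl_cons]
    have hnd : (pvSubs w2).Nodup := by unfold pvSubs; exact PySem.List.nodup_dedup _
    have hcon : ((pvSubs w2).foldl (fun d s =>
        if d.contains s then d.modify s [] (fun l => l ++ [w2]) else d) d).contains k = true := by
      rw [pv_inner_contains]; exact hk
    rw [ih _ k hcon, pv_inner_getD w2 _ hnd d k hk, List.filter_cons]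
    by_cases hm : k ∈ pvSubs w2
    · simp [hm, List.append_assoc]
    · simp [hm]

-- the initial dict: every input string is a key, every bucket is empty
theorem pv_init_contains (P : List String) (k : String) (hk : k ∈ P) :
    (P.foldl (fun d w => d.insert w ([] : List String)) PySem.Dict.empty).contains k = true := by
  rw [PySem.Dict.contains_iff_mem_keys, PySem.Dict.keys_foldl_insert]
  have : (PySem.Dict.empty : PySem.Dict String (List String)).keys = [] := rfl
  rw [this]
  have : PySem.Set.update ([] : PySem.Set String) P = PySem.Set.ofList P := rfl
  rw [this, PySem.Set.mem_ofList]
  exact hk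

theorem pv_init_getD (P : List String) :
    ∀ (d : PySem.Dict String (List String)) (k : String), d.getD k [] = [] →
      (P.foldl (fun d w => d.insert w ([] : List String)) d).getD k [] = [] := by
  induction P with
  | nil => intro d k h; exact h
  | cons w P ih =>
    intro d k h
    rw [List.foldl_cons]
    apply ih
    by_cases hkw : k = w
    · subst hkw; rw [PySem.Dict.getD_insert_self]
    · rw [PySem.Dict.getD_insert, if_neg hkw]; exact h

-- updating with elements already present changes nothing
theorem pv_update_of_subset {α : Type} [BEq α] [LawfulBEq α] (ys : List α) :
    ∀ (s : PySem.Set α), (∀ y ∈ ys, y ∈ s) → PySem.Set.update s ys = s := by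
  induction ys with
  | nil => intro s _; exact PySem.Set.update_nil s
  | cons y ys ih =>
    intro s h
    rw [PySem.Set.update_cons, PySem.Set.add_of_mem (h y (List.mem_cons_self))]
    exact ih s (fun z hz => h z (List.mem_cons_of_mem _ hz))

-- set(flatMap over l) = set(flatMap over set(l))
theorem pv_ofList_flatMap_ofList {α β : Type} [BEq α] [LawfulBEq α] [BEq β]
    [LawfulBEq β] (g : α → List β) (l : List α) :
    PySem.Set.ofList (l.flatMap g) = PySem.Set.ofList ((PySem.Set.ofList l).flatMap g) := by
  induction l using List.reverseRecOn with
  | nil => rfl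
  | append_singleton l x ih =>
    rw [List.flatMap_append, PySem.Set.ofList_append (l.flatMap g),
        PySem.Set.ofList_append_singleton l x, PySem.Set.add_eq_ite]
    by_cases hx : x ∈ PySem.Set.ofList l
    · rw [if_pos hx, ← ih]
      have hxl : x ∈ l := (PySem.Set.mem_ofList l x).mp hx
      apply pv_update_of_subset
      intro y hy
      simp only [List.flatMap_cons, List.flatMap_nil, List.append_nil] at hy
      exact (PySem.Set.mem_ofList _ y).mpr (List.mem_flatMap.mpr ⟨x, hxl, hy⟩)
    · rw [if_neg hx, List.flatMap_append, PySem.Set.ofList_append, ← ih]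

-- set() commutes with filter
theorem pv_ofList_filter {α : Type} [BEq α] [LawfulBEq α] (q : α → Bool) (l : List α) :
    PySem.Set.ofList (l.filter q) = (PySem.Set.ofList l).filter q := by
  induction l using List.reverseRecOn with
  | nil => rfl
  | append_singleton l x ih =>
    rw [List.filter_append, PySem.Set.ofList_append_singleton l x, PySem.Set.add_eq_ite]
    by_cases hq : q x
    · have hfx : List.filter q [x] = [x] := by simp [hq]
      rw [hfx, PySem.Set.ofList_append_singleton, PySem.Set.add_eq_ite]
      by_cases hx : x ∈ PySem.Set.ofList l
      · have hxf : x ∈ PySem.Set.ofList (l.filter q) := by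
          rw [PySem.Set.mem_ofList, List.mem_filter]
          exact ⟨(PySem.Set.mem_ofList l x).mp hx, hq⟩
        rw [if_pos hx, if_pos hxf, ih]
      · have hxf : x ∉ PySem.Set.ofList (l.filter q) := by
          rw [PySem.Set.mem_ofList, List.mem_filter]
          intro h
          exact hx ((PySem.Set.mem_ofList l x).mpr h.1)
        rw [if_neg hx, if_neg hxf, ih, List.filter_append, hfx]
    · have hfx : List.filter q [x] = [] := by simp [hq]
      rw [hfx, List.append_nil, ih]
      by_cases hx : x ∈ PySem.Set.ofList l
      · rw [if_pos hx]
      · rw [if_neg hx, List.filter_append, hfx, List.append_nil]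

-- updating with (set ys).map f is updating with ys.map f
theorem pv_update_map_ofList {α β : Type} [BEq α] [LawfulBEq α] [BEq β] [LawfulBEq β]
    (f : α → β) (ys : List α) :
    ∀ (s : PySem.Set β),
      PySem.Set.update s ((PySem.Set.ofList ys).map f) = PySem.Set.update s (ys.map f) := by
  induction ys using List.reverseRecOn with
  | nil => intro s; rfl
  | append_singleton ys y ih =>
    intro s
    rw [List.map_append, PySem.Set.update_append, PySem.Set.ofList_append_singleton,
        PySem.Set.add_eq_ite]
    by_cases hy : y ∈ PySem.Set.ofList ys
    · rw [if_pos hy, ih]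
      have hmem : f y ∈ PySem.Set.update s (ys.map f) := by
        rw [PySem.Set.mem_update]
        exact Or.inr (List.mem_map_of_mem ((PySem.Set.mem_ofList ys y).mp hy))
      simp only [List.map_cons, List.map_nil]
      rw [PySem.Set.update_cons, PySem.Set.add_of_mem hmem, PySem.Set.update_nil]
    · rw [if_neg hy, List.map_append, PySem.Set.update_append, ih]

-- congruence for flatMap chunks under update
theorem pv_update_flatMap_congr {α β : Type} [BEq β] (g1 g2 : α → List β) (u : List α)
    (h : ∀ (s : PySem.Set β) (w : α), w ∈ u → PySem.Set.update s (g1 w) = PySem.Set.update s (g2 w)) :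
    ∀ (s : PySem.Set β), PySem.Set.update s (u.flatMap g1) = PySem.Set.update s (u.flatMap g2) := by
  induction u with
  | nil => intro s; rfl
  | cons x u ih =>
    intro s
    rw [List.flatMap_cons, List.flatMap_cons, PySem.Set.update_append, PySem.Set.update_append,
        h s x List.mem_cons_self]
    exact ih (fun s w hw => h s w (List.mem_cons_of_mem _ hw)) _

-- ===== VERDICT (by name: the statement is the Claim_ definition above) =====
theorem proper_substring_pairs_spec : Claim_equal_proper_substring_pairs := by
  intro strings _
  unfold Spec_proper_substring_pairs proper_substring_pairs proper_substring_pairs_alt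
  simp only [PySem.List.dedup_eq_ofList]
  -- B's buckets are the filtered container lists
  have hbucket : ∀ w1 ∈ PySem.Set.ofList strings,
      (((PySem.Set.ofList strings).foldl (fun d w2 =>
        (pvSubs w2).foldl (fun d s =>
          if d.contains s then d.modify s [] (fun l => l ++ [w2]) else d) d)
        ((PySem.Set.ofList strings).foldl (fun d w => d.insert w [])
          PySem.Dict.empty)).getD w1 [])
      = (PySem.Set.ofList strings).filter
          (fun w2 => decide (PySem.Str.len w1 < PySem.Str.len w2) && PySem.Str.isIn w1 w2) := by
    intro w1 hw1
    rw [pv_outer_getD _ _ w1 (pv_init_contains _ w1 hw1),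
        pv_init_getD _ _ w1 (by rfl), List.nil_append]
    apply List.filter_congr
    intro w2 _
    exact pv_seen_iff w1 w2
  have hBlist : ((PySem.Set.ofList strings).flatMap (fun w1 =>
      ((((PySem.Set.ofList strings).foldl (fun d w2 =>
        (pvSubs w2).foldl (fun d s =>
          if d.contains s then d.modify s [] (fun l => l ++ [w2]) else d) d)
        ((PySem.Set.ofList strings).foldl (fun d w => d.insert w [])
          PySem.Dict.empty)).getD w1 []).map (fun w2 => (w2, w1)))))
      = ((PySem.Set.ofList strings).flatMap (fun w1 =>
          (((PySem.Set.ofList strings).filter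
            (fun w2 => decide (PySem.Str.len w1 < PySem.Str.len w2)
              && PySem.Str.isIn w1 w2)).map (fun w2 => (w2, w1))))) := by
    unfold List.flatMap
    congr 1
    apply List.map_congr_left
    intro w1 hw1
    rw [hbucket w1 hw1]
  rw [hBlist]
  -- A's side: dedup the generator, then replace the inner filter base by the dedup
  have hpred : (fun word1 : String => (strings.filter (fun word2 =>
        PySem.Str.isIn word1 word2 && word1 != word2)).map (fun word2 => (word2, word1)))
      = (fun word1 : String => (strings.filter (fun word2 =>
        decide (PySem.Str.len word1 < PySem.Str.len word2) && PySem.Str.isIn word1 word2)).map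
        (fun word2 => (word2, word1))) := by
    funext word1
    congr 1
    apply List.filter_congr
    intro w2 _
    exact pv_pred_eq word1 w2
  rw [hpred, pv_ofList_flatMap_ofList]
  rw [← PySem.Set.update_nil_left ((PySem.Set.ofList strings).flatMap (fun word1 =>
        (strings.filter (fun word2 =>
          decide (PySem.Str.len word1 < PySem.Str.len word2) && PySem.Str.isIn word1 word2)).map
          (fun word2 => (word2, word1)))),
      ← PySem.Set.update_nil_left ((PySem.Set.ofList strings).flatMap (fun word1 =>
        ((PySem.Set.ofList strings).filter (fun word2 =>
          decide (PySem.Str.len word1 < PySem.Str.len word2) && PySem.Str.isIn word1 word2)).map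
          (fun word2 => (word2, word1))))]
  apply pv_update_flatMap_congr
  intro s w1 _
  rw [← pv_ofList_filter, pv_update_map_ofList]
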